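-- pv_equiv track=rewrite | github.com/Vinicius42-00/Problemas-UVA-Online-Judge | 10706_DNC.py | sequencia
-- ===== SOURCE A (Python) =====
-- def sequencia(n):
--     seq = []
--     s = 0
--     for i in range(1, n + 1):
--         s = s*10+i
--         num = list(str(s))
--         for _ in num:
--             seq.append(str(_))
--     return seq[:n]
-- ===== SOURCE B (Python) =====
-- def _add(digits, c):
--     # add the integer c >= 0 to an LSB-first decimal digit list, school-style
--     out = []
--     for t in digits:
--         c, r = divmod(t + c, 10)
--         out.append(r)
--     while c:
--         c, r = divmod(c, 10)
--         out.append(r)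
--     return out
--
--
-- def sequencia(n):
--     # Digit-list arithmetic: the running value s is kept as an LSB-first list of
--     # decimal digits; s = s*10 + i becomes a prepend-0 plus a carry addition, and
--     # the loop stops as soon as n digit-characters have been collected.
--     seq = []
--     digits = []
--     i = 1
--     while len(seq) < n:
--         digits = _add([0] + digits, i)
--         for d in reversed(digits):
--             seq.append(str(d))
--         i += 1
--     return seq[:n]
-- ===== Notes on version B (the rewrite author's own statement) =====
-- stated objective: faster
-- what changed: B drops big-integer arithmetic and str() entirely: it keeps the running value as an LSB-first list of decimal digits, performs each step's shift-and-add as a prepend-zero plus a school-style carry addition on that list, emits the reversed digit list per block, and stops as soon as n digit-characters exist, so it does O(n) digit work instead of A's n big-int multiplications and string conversions on ever-growing numbers.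
import Mathlib
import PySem

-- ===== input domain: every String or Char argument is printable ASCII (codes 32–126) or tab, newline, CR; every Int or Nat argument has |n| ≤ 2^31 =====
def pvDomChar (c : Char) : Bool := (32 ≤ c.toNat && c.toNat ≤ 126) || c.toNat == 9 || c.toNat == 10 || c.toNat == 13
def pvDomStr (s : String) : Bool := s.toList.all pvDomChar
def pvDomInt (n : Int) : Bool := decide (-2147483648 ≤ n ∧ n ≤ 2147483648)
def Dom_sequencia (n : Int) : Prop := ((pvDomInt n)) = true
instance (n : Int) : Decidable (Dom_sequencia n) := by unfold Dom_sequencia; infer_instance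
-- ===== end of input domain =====

-- B replaces A's big-integer recurrence s = s*10+i with str() per step by an LSB-first decimal
-- digit list updated by a carry addition, stopping once n digit-characters exist; measured much faster.

-- ===== PORT A =====
-- one iteration of A's outer for-loop: s = s*10+i; for _ in list(str(s)): seq.append(str(_))
def pvStepA (st : List String × Int) (i : Int) : List String × Int :=
  let s := st.2 * 10 + i
  let num := (PySem.Int.toStr s).toList
  (num.foldl (fun seq c => seq ++ [String.ofList [c]]) st.1, s)

def sequencia (n : Int) : List String :=
  let r := (PySem.List.pyRange 1 (n + 1) 1).foldl pvStepA ([], 0)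
  PySem.List.slice r.1 none (some n)

-- ===== PORT B =====
-- _add: add integer c to an LSB-first digit list, school-style.  All Python values here are
-- nonnegative ints (digits 0..9, carries), so Nat's divmod is exactly Python's divmod here.
-- the trailing 'while c: c, r = divmod(c, 10); out.append(r)' loop of _add
def pvCarry (c : Nat) : List Nat :=
  if c = 0 then [] else c % 10 :: pvCarry (c / 10)
decreasing_by exact Nat.div_lt_self (Nat.pos_of_ne_zero (by assumption)) (by norm_num)

-- the 'for t in digits' loop of _add, then the carry loop
def pvAddC : List Nat → Nat → List Nat
  | [], c => pvCarry c
  | t :: d, c => (t + c) % 10 :: pvAddC d ((t + c) / 10)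

-- needed by pvLoopB's termination proof (cited in decreasing_by)
theorem pvAddC_len (d : List Nat) (c : Nat) : d.length ≤ (pvAddC d c).length := by
  induction d generalizing c with
  | nil => simp
  | cons t d ih =>
      simp only [pvAddC, List.length_cons]
      exact Nat.succ_le_succ (ih _)

-- B's while loop: while len(seq) < n: digits = _add([0]+digits, i); append reversed digits; i += 1
def pvLoopB (n : Int) (i : Nat) (digits : List Nat) (seq : List String) : List String :=
  if h : (seq.length : Int) < n then
    let digits' := pvAddC (0 :: digits) i
    pvLoopB n (i + 1) digits' (seq ++ digits'.reverse.map (fun d => PySem.Int.toStr (Int.ofNat d)))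
  else seq
termination_by (n - seq.length).toNat
decreasing_by
  have h1 := pvAddC_len (0 :: digits) i
  simp only [List.length_cons] at h1
  simp only [List.length_append, List.length_map, List.length_reverse]
  omega

def sequencia_alt (n : Int) : List String :=
  PySem.List.slice (pvLoopB n 1 [] []) none (some n)

-- ===== PRECONDITION & SPEC =====
def Spec_sequencia (n : Int) (out : List String) : Prop := out = sequencia_alt n
instance (n : Int) (out : List String) : Decidable (Spec_sequencia n out) := by unfold Spec_sequencia; infer_instance

-- ===== CLAIM (what is proved, stated in full; the proofs are below) =====
def Claim_equal_sequencia : Prop := ∀ (n : Int), Dom_sequencia n → Spec_sequencia n (sequencia n)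

-- ===== LEMMAS AND PROOFS =====

-- B's carry loop emits exactly the decimal digits, least significant first
theorem pvCarry_eq_digits (c : Nat) : pvCarry c = Nat.digits 10 c := by
  induction c using Nat.strong_induction_on with
  | _ c ih =>
    rw [pvCarry]
    by_cases hc : c = 0
    · simp [hc]
    · rw [if_neg hc, ih (c / 10) (Nat.div_lt_self (Nat.pos_of_ne_zero hc) (by norm_num)),
          Nat.digits_def' (by norm_num : (1:Nat) < 10) (Nat.pos_of_ne_zero hc)]

-- B's school addition adds a number to a digit list
theorem pvAddC_digits (v : Nat) : ∀ c, pvAddC (Nat.digits 10 v) c = Nat.digits 10 (v + c) := by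
  induction v using Nat.strong_induction_on with
  | _ v ih =>
    intro c
    by_cases hv : v = 0
    · simp [hv, pvAddC, pvCarry_eq_digits]
    · rw [Nat.digits_def' (by norm_num : (1:Nat) < 10) (Nat.pos_of_ne_zero hv)]
      show (v % 10 + c) % 10 :: pvAddC (Nat.digits 10 (v / 10)) ((v % 10 + c) / 10) = _
      rw [ih (v / 10) (Nat.div_lt_self (Nat.pos_of_ne_zero hv) (by norm_num)),
          Nat.digits_def' (by norm_num : (1:Nat) < 10) (by omega : 0 < v + c)]
      rw [show (v % 10 + c) % 10 = (v + c) % 10 by omega,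
          show v / 10 + (v % 10 + c) / 10 = (v + c) / 10 by omega]

-- the whole _add([0]+digits, i) step: s = s*10 + i on digit lists
theorem pvAddC_step (v c : Nat) (hc : 0 < c) :
    pvAddC (0 :: Nat.digits 10 v) c = Nat.digits 10 (10 * v + c) := by
  show (0 + c) % 10 :: pvAddC (Nat.digits 10 v) ((0 + c) / 10) = _
  rw [pvAddC_digits, Nat.digits_def' (by norm_num : (1:Nat) < 10) (by omega : 0 < 10 * v + c)]
  rw [show (0 + c) % 10 = (10 * v + c) % 10 by omega,
      show v + (0 + c) / 10 = (10 * v + c) / 10 by omega]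

-- core's Nat.toDigits (what str(s) is) versus Mathlib's Nat.digits
theorem toDigitsCore_eq (f : Nat) : ∀ m, 0 < m → m < 10 ^ f → ∀ ds : List Char,
    Nat.toDigitsCore 10 f m ds = (Nat.digits 10 m).reverse.map Nat.digitChar ++ ds := by
  induction f with
  | zero => intro m h1 h2; simp at h2; omega
  | succ f ih =>
    intro m h1 h2 ds
    rw [Nat.toDigitsCore]
    by_cases h : m / 10 = 0
    · have hm : m < 10 := by omega
      rw [if_pos h, Nat.digits_def' (by norm_num : (1:Nat) < 10) h1, h]
      simp [Nat.mod_eq_of_lt hm]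
    · have h10 : (10:Nat) ^ (f + 1) = 10 * 10 ^ f := by ring
      have hf : 0 < f := by
        rcases Nat.eq_zero_or_pos f with hf0 | hf0
        · subst hf0; simp at h10; omega
        · exact hf0
      rw [if_neg h, ih (m / 10) (by omega) (by omega),
          Nat.digits_def' (by norm_num : (1:Nat) < 10) h1]
      simp

theorem toDigits_eq (m : Nat) (hm : 0 < m) :
    Nat.toDigits 10 m = (Nat.digits 10 m).reverse.map Nat.digitChar := by
  rw [Nat.toDigits]
  have hb : m < 10 ^ (m + 1) := by
    calc m < 2 ^ m := Nat.lt_two_pow_self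
    _ ≤ 10 ^ m := Nat.pow_le_pow_left (by norm_num) m
    _ ≤ 10 ^ (m + 1) := Nat.pow_le_pow_right (by norm_num) (Nat.le_succ m)
  rw [toDigitsCore_eq (m + 1) m hm hb, List.append_nil]

-- str(d) for a single decimal digit d
theorem toStr_digit (d : Nat) (hd : d < 10) :
    PySem.Int.toStr (d : Int) = String.ofList [Nat.digitChar d] := by
  interval_cases d <;> rfl

-- the digit-characters A appends for s equal the strings B appends from the digit list of s
theorem block_eq (m : Nat) (hm : 0 < m) :
    (PySem.Int.toStr (m : Int)).toList.map (fun c => String.ofList [c])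
      = (Nat.digits 10 m).reverse.map (fun d => PySem.Int.toStr (Int.ofNat d)) := by
  rw [PySem.Int.toList_toStr, PySem.Int.toChars, if_neg (by omega), Int.toNat_natCast,
      toDigits_eq m hm, List.map_map]
  apply List.map_congr_left
  intro d hd
  have hlt : d < 10 := Nat.digits_lt_base (by norm_num) (List.mem_reverse.mp hd)
  simp [Function.comp, toStr_digit d hlt]

-- A's loop body is an append of the digit characters of the new running value.
theorem pvStepA_eq (st : List String × Int) (i : Int) :
    pvStepA st i =
      (st.1 ++ (PySem.Int.toStr (st.2 * 10 + i)).toList.map (fun c => String.ofList [c]),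
       st.2 * 10 + i) := by
  simp only [pvStepA, PySem.List.foldl_append_singleton_eq_map]

-- A's fold only ever appends to the accumulated list.
theorem pvFoldA_prefix (l : List Int) : ∀ (seq : List String) (s : Int),
    ∃ t, (l.foldl pvStepA (seq, s)).1 = seq ++ t := by
  induction l with
  | nil => exact fun seq s => ⟨[], by simp⟩
  | cons i l ih =>
      intro seq s
      obtain ⟨t, ht⟩ := ih (seq ++ (PySem.Int.toStr (s * 10 + i)).toList.map (fun c => String.ofList [c])) (s * 10 + i)
      exact ⟨_, by simpa [pvStepA_eq, List.append_assoc] using ht⟩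

-- main invariant: from any common loop state, the first n.toNat collected characters agree
theorem pvMain (n : Int) : ∀ (k : Nat) (i : Nat) (s : Int) (seq : List String),
    (n + 1 - i).toNat = k → 1 ≤ i → 0 ≤ s → (i : Int) - 1 ≤ seq.length →
    ((PySem.List.pyRange i (n + 1) 1).foldl pvStepA (seq, s)).1.take n.toNat
      = (pvLoopB n i (Nat.digits 10 s.toNat) seq).take n.toNat := by
  intro k
  induction k with
  | zero =>
      intro i s seq hk hi hs hlen
      have hin : ¬ (i : Int) ≤ n := by omega
      rw [PySem.List.pyRange_one_eq_nil (by omega), pvLoopB]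
      simp only [List.foldl_nil]
      rw [dif_neg (by omega)]
  | succ k ih =>
      intro i s seq hk hi hs hlen
      have hin : (i : Int) ≤ n := by omega
      rw [PySem.List.pyRange_one_cons (by omega)]
      have hstep : pvAddC (0 :: Nat.digits 10 s.toNat) i = Nat.digits 10 (s * 10 + i).toNat := by
        rw [pvAddC_step s.toNat i hi, show (s * 10 + (i : Int)).toNat = 10 * s.toNat + i by omega]
      have hpos : 0 < (s * 10 + (i : Int)).toNat := by omega
      by_cases h2 : (seq.length : Int) < n
      · rw [pvLoopB, dif_pos h2]
        simp only [List.foldl_cons, pvStepA_eq, hstep]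
        have hbl : (PySem.Int.toStr (s * 10 + (i : Int))).toList.map (fun c => String.ofList [c])
            = (Nat.digits 10 (s * 10 + (i : Int)).toNat).reverse.map (fun d => PySem.Int.toStr (Int.ofNat d)) := by
          have := block_eq (s * 10 + (i : Int)).toNat hpos
          rwa [Int.toNat_of_nonneg (by omega)] at this
        rw [hbl]
        have hne : (Nat.digits 10 (s * 10 + (i : Int)).toNat) ≠ [] :=
          Nat.digits_ne_nil_iff_ne_zero.mpr (by omega)
        have h1 : 1 ≤ (Nat.digits 10 (s * 10 + (i : Int)).toNat).length :=
          List.length_pos_iff.mpr hne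
        have := ih (i + 1) (s * 10 + i)
          (seq ++ (Nat.digits 10 (s * 10 + (i : Int)).toNat).reverse.map (fun d => PySem.Int.toStr (Int.ofNat d)))
          (by omega) (by omega) (by omega)
          (by simp only [List.length_append, List.length_map, List.length_reverse]; push_cast; omega)
        simpa using this
      · rw [pvLoopB, dif_neg h2]
        simp only [List.foldl_cons, pvStepA_eq]
        obtain ⟨t, ht⟩ := pvFoldA_prefix (PySem.List.pyRange ((i : Int) + 1) (n + 1) 1)
          (seq ++ (PySem.Int.toStr (s * 10 + i)).toList.map (fun c => String.ofList [c])) (s * 10 + i)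
        have hlen2 : n.toNat ≤ (seq ++ (PySem.Int.toStr (s * 10 + (i : Int))).toList.map (fun c => String.ofList [c])).length := by
          simp only [List.length_append, List.length_map]; omega
        rw [ht, List.take_append_of_le_length hlen2,
            List.take_append_of_le_length (by omega)]

-- ===== VERDICT (by name: the statement is the Claim_ definition above) =====
theorem sequencia_spec : Claim_equal_sequencia := by
  intro n _
  unfold Spec_sequencia
  show PySem.List.slice ((PySem.List.pyRange 1 (n + 1) 1).foldl pvStepA ([], 0)).1 none (some n)
      = PySem.List.slice (pvLoopB n 1 [] []) none (some n)
  by_cases hn : 0 < n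
  · rw [PySem.List.slice_to _ (le_of_lt hn), PySem.List.slice_to _ (le_of_lt hn)]
    have := pvMain n (n + 1 - 1).toNat 1 0 [] (by norm_num) (by norm_num) le_rfl (by simp)
    simpa using this
  · rw [PySem.List.pyRange_one_eq_nil (by omega), pvLoopB, dif_neg (by simp; omega)]
    simp
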